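-- pv_equiv track=rewrite | github.com/MisterKinn/nova-ai-windows-llite | script_runner.py | _sanitize_tabs
-- ===== SOURCE A (Python) =====
-- from typing import Callable, Dict, List
--
-- def _sanitize_tabs(lines: List[str]) -> List[str]:
--     """
--     Only keep insert_text('\\t') when it immediately precedes an insert_equation(...) line.
--     Otherwise replace it with a single space.
--     """
--     out: List[str] = []
--     i = 0
--     while i < len(lines):
--         line = lines[i]
--         if line.strip() == "insert_text('\\t')" or line.strip() == 'insert_text("\\t")':
--             j = i + 1
--             while j < len(lines) and not lines[j].strip():
--                 j += 1
--             if j < len(lines) and lines[j].lstrip().startswith("insert_equation("):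
--                 out.append(line)
--             else:
--                 out.append("insert_text(' ')")
--             i += 1
--             continue
--         out.append(line)
--         i += 1
--     return out
-- ===== SOURCE B (Python) =====
-- def _sanitize_tabs(lines):
--     """Single backward pass: eq_next tracks whether the nearest following
--     non-blank line (in the original input) starts with insert_equation(."""
--     res = []
--     eq_next = False
--     for line in reversed(lines):
--         s = line.strip()
--         if s == "insert_text('\\t')" or s == 'insert_text("\\t")':
--             res.append(line if eq_next else "insert_text(' ')")
--         else:
--             res.append(line)
--         if s:
--             eq_next = line.lstrip().startswith("insert_equation(")
--     res.reverse()
--     return res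
-- ===== Notes on version B (the rewrite author's own statement) =====
-- stated objective: alternative
-- what changed: Replaces A's forward scan with a nested blank-skipping lookahead (worst-case quadratic) by a single backward pass that carries one state flag: whether the nearest following non-blank original line starts with insert_equation(.
import Mathlib
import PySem

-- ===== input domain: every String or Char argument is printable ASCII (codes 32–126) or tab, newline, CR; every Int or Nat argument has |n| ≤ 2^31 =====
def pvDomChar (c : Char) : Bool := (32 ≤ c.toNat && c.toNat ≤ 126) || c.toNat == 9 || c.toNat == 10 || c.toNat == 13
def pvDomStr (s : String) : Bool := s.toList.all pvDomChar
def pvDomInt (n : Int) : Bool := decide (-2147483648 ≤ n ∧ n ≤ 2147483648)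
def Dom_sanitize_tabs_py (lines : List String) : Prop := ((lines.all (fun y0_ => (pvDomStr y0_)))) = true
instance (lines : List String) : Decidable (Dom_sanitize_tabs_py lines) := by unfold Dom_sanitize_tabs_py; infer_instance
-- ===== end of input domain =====

-- B replaces A's forward scan with nested blank-skipping lookahead by one backward pass
-- carrying a single state flag (objective: alternative single-pass decomposition).

-- ===== PORT A =====

-- inner 'while j < len(lines) and not lines[j].strip(): j += 1'
def pvSkipBlanks (lines : List String) (j : Nat) : Nat :=
  if h : j < lines.length then
    if PySem.Str.strip lines[j] = "" then pvSkipBlanks lines (j + 1) else j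
  else j
termination_by lines.length - j

-- outer 'while i < len(lines): …' accumulating out
def pvALoop (lines : List String) (i : Nat) (out : List String) : List String :=
  if h : i < lines.length then
    let line := lines[i]
    if PySem.Str.strip line = "insert_text('\\t')" ∨ PySem.Str.strip line = "insert_text(\"\\t\")" then
      let j := pvSkipBlanks lines (i + 1)
      let out :=
        if decide (j < lines.length) &&
            PySem.Str.startswith (PySem.Str.lstrip (lines.getD j "")) "insert_equation(" then
          out ++ [line]
        else
          out ++ ["insert_text(' ')"]
      pvALoop lines (i + 1) out
    else
      pvALoop lines (i + 1) (out ++ [line])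
  else out
termination_by lines.length - i

def sanitize_tabs_py (lines : List String) : List String :=
  pvALoop lines 0 []

-- ===== PORT B =====

-- one step of Source B's backward loop; state = (res, eq_next)
def pvBStep (st : List String × Bool) (line : String) : List String × Bool :=
  let s := PySem.Str.strip line
  let res :=
    if s = "insert_text('\\t')" ∨ s = "insert_text(\"\\t\")" then
      st.1 ++ [if st.2 then line else "insert_text(' ')"]
    else
      st.1 ++ [line]
  let eqNext :=
    if s ≠ "" then PySem.Str.startswith (PySem.Str.lstrip line) "insert_equation(" else st.2
  (res, eqNext)

def sanitize_tabs_py_alt (lines : List String) : List String :=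
  ((lines.reverse).foldl pvBStep ([], false)).1.reverse

-- ===== PRECONDITION & SPEC =====
def Spec_sanitize_tabs_py (lines : List String) (out : List String) : Prop := out = sanitize_tabs_py_alt lines
instance (lines : List String) (out : List String) : Decidable (Spec_sanitize_tabs_py lines out) := by unfold Spec_sanitize_tabs_py; infer_instance

-- ===== CLAIM (what is proved, stated in full; the proofs are below) =====
def Claim_equal_sanitize_tabs_py : Prop := ∀ (lines : List String), Dom_sanitize_tabs_py lines → Spec_sanitize_tabs_py lines (sanitize_tabs_py lines)

-- ===== LEMMAS AND PROOFS =====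

-- common characterisation: 'does the first non-blank line start with insert_equation(?'
def pvEqNext : List String → Bool
  | [] => false
  | l :: rest =>
    if PySem.Str.strip l = "" then pvEqNext rest
    else PySem.Str.startswith (PySem.Str.lstrip l) "insert_equation("

-- common spec: the output, structurally on the list
def pvSpecF : List String → List String
  | [] => []
  | l :: rest =>
    (if PySem.Str.strip l = "insert_text('\\t')" ∨ PySem.Str.strip l = "insert_text(\"\\t\")" then
      (if pvEqNext rest then l else "insert_text(' ')")
    else l) :: pvSpecF rest

theorem pvSkipBlanks_eqNext (lines : List String) (j : Nat) :
    (decide (pvSkipBlanks lines j < lines.length) &&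
      PySem.Str.startswith (PySem.Str.lstrip (lines.getD (pvSkipBlanks lines j) ""))
        "insert_equation(") = pvEqNext (lines.drop j) := by
  unfold pvSkipBlanks
  by_cases h : j < lines.length
  · have hd : lines.drop j = lines[j] :: lines.drop (j + 1) :=
      List.drop_eq_getElem_cons h
    by_cases hb : PySem.Str.strip lines[j] = ""
    · simp only [h, hb, if_pos, dif_pos]
      rw [pvSkipBlanks_eqNext lines (j + 1), hd]
      simp [pvEqNext, hb]
    · simp only [h, hb, dif_pos, if_neg, not_false_iff]
      rw [hd]
      simp [pvEqNext, hb, h, List.getD_eq_getElem?_getD]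
  · have : lines.length ≤ j := Nat.le_of_not_lt h
    rw [List.drop_eq_nil_of_le this]
    simp [pvEqNext, h]
termination_by lines.length - j

theorem pvALoop_spec (lines : List String) (i : Nat) (out : List String) :
    pvALoop lines i out = out ++ pvSpecF (lines.drop i) := by
  unfold pvALoop
  by_cases h : i < lines.length
  · have hd : lines.drop i = lines[i] :: lines.drop (i + 1) :=
      List.drop_eq_getElem_cons h
    by_cases hc : PySem.Str.strip lines[i] = "insert_text('\\t')" ∨
        PySem.Str.strip lines[i] = "insert_text(\"\\t\")"
    · simp only [h, hc, dif_pos, if_pos]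
      rw [pvALoop_spec lines (i + 1), pvSkipBlanks_eqNext lines (i + 1), hd]
      by_cases he : pvEqNext (lines.drop (i + 1)) = true
      · simp [pvSpecF, hc, he]
      · simp only [Bool.not_eq_true] at he
        simp [pvSpecF, hc, he]
    · simp only [h, hc, dif_pos, if_neg, not_false_iff]
      rw [pvALoop_spec lines (i + 1), hd]
      simp [pvSpecF, hc]
  · have : lines.length ≤ i := Nat.le_of_not_lt h
    rw [List.drop_eq_nil_of_le this]
    simp [pvSpecF, h]
termination_by lines.length - i

theorem pvBFold_spec (lines : List String) :
    lines.foldr (fun line st => pvBStep st line) ([], false) =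
      ((pvSpecF lines).reverse, pvEqNext lines) := by
  induction lines with
  | nil => simp [pvSpecF, pvEqNext]
  | cons l rest ih =>
    rw [List.foldr_cons, ih]
    simp only [pvBStep, pvSpecF, pvEqNext]
    by_cases hb : PySem.Str.strip l = ""
    · have hc : ¬ (PySem.Str.strip l = "insert_text('\\t')" ∨
          PySem.Str.strip l = "insert_text(\"\\t\")") := by
        rw [hb]; decide
      simp [hb]
    · by_cases hc : PySem.Str.strip l = "insert_text('\\t')" ∨
          PySem.Str.strip l = "insert_text(\"\\t\")"
      · by_cases he : pvEqNext rest = true <;> simp [hb, hc, he]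
      · simp [hb, hc]

-- ===== VERDICT (by name: the statement is the Claim_ definition above) =====
theorem sanitize_tabs_py_spec : Claim_equal_sanitize_tabs_py := by
  intro lines _
  unfold Spec_sanitize_tabs_py sanitize_tabs_py sanitize_tabs_py_alt
  rw [pvALoop_spec, List.foldl_reverse, pvBFold_spec]
  simp
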